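-- pv_equiv track=rewrite | github.com/DHS-IT-Solutions/DocWain | src/intelligence_v2/profile_builder.py | _summarise_entities
-- ===== SOURCE A (Python) =====
-- from typing import Any, Dict, List, Optional
--
-- def _summarise_entities(entities: List[Dict[str, Any]]) -> Dict[str, List[str]]:
--     """Group entities by type and return top names per type."""
--     by_type: Dict[str, List[str]] = {}
--     for e in entities:
--         etype = e.get("type", "OTHER")
--         name = e.get("name", "")
--         if name:
--             by_type.setdefault(etype, []).append(name)
--
--     # Deduplicate and limit
--     return {
--         etype: sorted(set(names))[:30]
--         for etype, names in by_type.items()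
--     }
-- ===== SOURCE B (Python) =====
-- from typing import Any, Dict, List
--
--
-- def _summarise_entities(entities: List[Dict[str, Any]]) -> Dict[str, List[str]]:
--     """Group entities by type and return top names per type."""
--     pairs = [(e.get("type", "OTHER"), e.get("name", "")) for e in entities]
--     pairs = [p for p in pairs if p[1]]
--     result: Dict[str, List[str]] = {t: [] for t, _ in pairs}
--     seen = set()
--     # one pass over the globally name-sorted pairs: each type's list comes out
--     # sorted and duplicate-free, and stops growing at 30 entries
--     for t, n in sorted(pairs, key=lambda p: p[1]):
--         if (t, n) not in seen and len(result[t]) < 30: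
--             seen.add((t, n))
--             result[t].append(n)
--     return result
-- ===== Notes on version B (the rewrite author's own statement) =====
-- stated objective: alternative
-- what changed: B replaces A's dict-grouping followed by per-group sorted(set(names))[:30] with a single global sort of the filtered (type,name) pairs by name and one pass over that sorted sequence, maintaining per-type capped lists with a shared seen-set, so each type's list is built already sorted, deduplicated and cut off at 30.
import Mathlib
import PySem

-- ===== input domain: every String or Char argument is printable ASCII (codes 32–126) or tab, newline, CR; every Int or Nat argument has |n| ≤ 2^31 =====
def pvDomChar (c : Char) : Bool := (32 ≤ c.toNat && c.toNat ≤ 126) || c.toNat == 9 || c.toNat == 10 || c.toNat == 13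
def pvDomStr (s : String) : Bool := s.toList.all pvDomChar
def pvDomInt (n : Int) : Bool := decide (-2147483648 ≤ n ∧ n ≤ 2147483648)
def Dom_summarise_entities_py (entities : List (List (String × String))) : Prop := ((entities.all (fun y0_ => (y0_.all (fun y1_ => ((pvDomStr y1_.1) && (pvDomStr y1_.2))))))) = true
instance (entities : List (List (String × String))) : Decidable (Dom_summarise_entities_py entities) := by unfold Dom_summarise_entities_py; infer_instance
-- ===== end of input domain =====

-- B replaces A's dict-grouping + per-group sorted(set)[:30] by one global sort of the
-- filtered (type, name) pairs by name and a single capped dedup-grouping pass over it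
-- (objective: alternative).

-- ===== PORT A =====
-- for e in entities: etype = e.get("type","OTHER"); name = e.get("name","");
--   if name: by_type.setdefault(etype, []).append(name)   -- = d[etype] = d.get(etype, []) + [name]
-- return {etype: sorted(set(names))[:30] for etype, names in by_type.items()}
def groupStepA (d : PySem.Dict String (List String)) (e : List (String × String)) : PySem.Dict String (List String) :=
  let etype := (PySem.Dict.mk e).getD "type" "OTHER"
  let name := (PySem.Dict.mk e).getD "name" ""
  if name ≠ "" then d.modify etype [] (fun ns => ns ++ [name]) else d

def summarise_entities_py (entities : List (List (String × String))) : List (String × List String) :=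
  (entities.foldl groupStepA PySem.Dict.empty).items.map (fun p =>
    (p.1, PySem.List.slice (PySem.List.sorted (PySem.Set.ofList p.2) (fun x => x)) none (some 30)))

-- ===== PORT B =====
-- Source B: pairs = [(e.get("type","OTHER"), e.get("name","")) for e in entities]; pairs = [p for p in pairs if p[1]]
def pairsB (entities : List (List (String × String))) : List (String × String) :=
  (entities.map (fun e => ((PySem.Dict.mk e).getD "type" "OTHER", (PySem.Dict.mk e).getD "name" ""))).filter
    (fun p => decide (p.2 ≠ ""))

-- Source B: result = {t: [] for t, _ in pairs}
def initB (pairs : List (String × String)) : PySem.Dict String (List String) :=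
  pairs.foldl (fun d p => d.insert p.1 []) PySem.Dict.empty

-- one iteration of Source B's loop over the sorted pairs; result[t] is always a present key
-- (t comes from the same pair list result was built from), so modify/getD with default []
-- is exact here
def stepB (st : PySem.Dict String (List String) × PySem.Set (String × String))
    (p : String × String) : PySem.Dict String (List String) × PySem.Set (String × String) :=
  if !(st.2.contains p) && decide ((st.1.getD p.1 []).length < 30)
  then (st.1.modify p.1 [] (fun l => l ++ [p.2]), st.2.add p)
  else st

def summarise_entities_py_alt (entities : List (List (String × String))) : List (String × List String) :=
  let pairs := pairsB entities
  ((PySem.List.sorted pairs (fun p => p.2)).foldl stepB (initB pairs, PySem.Set.empty)).1.items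

-- ===== PRECONDITION & SPEC =====
def Spec_summarise_entities_py (entities : List (List (String × String))) (out : List (String × List String)) : Prop := out = summarise_entities_py_alt entities
instance (entities : List (List (String × String))) (out : List (String × List String)) : Decidable (Spec_summarise_entities_py entities out) := by unfold Spec_summarise_entities_py; infer_instance

-- ===== CLAIM (what is proved, stated in full; the proofs are below) =====
def Claim_equal_summarise_entities_py : Prop := ∀ (entities : List (List (String × String))), Dom_summarise_entities_py entities → Spec_summarise_entities_py entities (summarise_entities_py entities)

-- ===== LEMMAS AND PROOFS =====

-- the capped dedup append step Source B's loop performs on one type's list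
def gCap (acc : List String) (n : String) : List String :=
  if n ∉ acc ∧ acc.length < 30 then acc ++ [n] else acc

-- its uncapped counterpart (ordered dedup)
def gInf (acc : List String) (n : String) : List String :=
  if n ∈ acc then acc else acc ++ [n]

theorem mem_foldl_gInf (ns : List String) (acc : List String) (y : String) :
    y ∈ ns.foldl gInf acc ↔ y ∈ acc ∨ y ∈ ns := by
  induction ns generalizing acc with
  | nil => simp
  | cons n ns ih =>
    simp only [List.foldl_cons, gInf]
    split_ifs with h
    · rw [ih]
      simp only [List.mem_cons]
      constructor
      · tauto
      · rintro (hy | rfl | hy)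
        · exact Or.inl hy
        · exact Or.inl h
        · exact Or.inr hy
    · rw [ih]
      simp only [List.mem_append, List.mem_cons]
      tauto

theorem pairwise_foldl_gInf (ns : List String) :
    ∀ (acc : List String), ns.Pairwise (· ≤ ·) → acc.Pairwise (· < ·) →
    (∀ a ∈ acc, ∀ m ∈ ns, a ≤ m) → (ns.foldl gInf acc).Pairwise (· < ·) := by
  induction ns with
  | nil => exact fun acc _ hacc _ => hacc
  | cons x xs ih =>
    intro acc hns hacc hcross
    rw [List.pairwise_cons] at hns
    simp only [List.foldl_cons, gInf]
    split_ifs with h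
    · exact ih acc hns.2 hacc (fun a ha m hm => hcross a ha m (List.mem_cons_of_mem x hm))
    · refine ih _ hns.2 ?_ ?_
      · refine List.pairwise_append.2 ⟨hacc, by simp, ?_⟩
        intro a ha b hb
        rw [List.mem_singleton] at hb
        have hax : a ≤ x := hcross a ha x (by simp)
        have hne : a ≠ x := fun he => h (he ▸ ha)
        rw [hb]
        exact lt_of_le_of_ne hax hne
      · intro a ha m hm
        rcases List.mem_append.1 ha with ha' | ha'
        · exact hcross a ha' m (List.mem_cons_of_mem x hm)
        · rw [List.mem_singleton] at ha'; subst ha'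
          exact hns.1 m hm

-- the capped fold is the 30-cut of the uncapped fold
theorem foldl_gCap_take (ns : List String) (uacc : List String) :
    ns.foldl gCap (uacc.take 30) = (ns.foldl gInf uacc).take 30 := by
  induction ns generalizing uacc with
  | nil => rfl
  | cons n ns ih =>
    simp only [List.foldl_cons]
    by_cases hlen : uacc.length < 30
    · have ht : uacc.take 30 = uacc := List.take_of_length_le (le_of_lt hlen)
      by_cases hm : n ∈ uacc
      · have h1 : gCap (uacc.take 30) n = uacc.take 30 := by
          unfold gCap
          rw [ht]
          exact if_neg (fun hc => hc.1 hm)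
        have h2 : gInf uacc n = uacc := by unfold gInf; rw [if_pos hm]
        rw [h1, h2, ih uacc]
      · have h1 : gCap (uacc.take 30) n = (uacc ++ [n]).take 30 := by
          unfold gCap
          have hlen2 : (uacc ++ [n]).length ≤ 30 := by
            simp
            omega
          rw [ht, if_pos ⟨hm, hlen⟩, List.take_of_length_le hlen2]
        have h2 : gInf uacc n = uacc ++ [n] := by unfold gInf; rw [if_neg hm]
        rw [h1, h2, ih (uacc ++ [n])]
    · have hlen30 : (uacc.take 30).length = 30 := by
        simp [List.length_take]; omega
      have h1 : gCap (uacc.take 30) n = uacc.take 30 := by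
        unfold gCap
        split_ifs with hc
        · exact absurd (hlen30 ▸ hc.2) (lt_irrefl 30)
        · rfl
      rw [h1]
      by_cases hm : n ∈ uacc
      · have h2 : gInf uacc n = uacc := by unfold gInf; rw [if_pos hm]
        rw [h2, ih uacc]
      · have h2 : gInf uacc n = uacc ++ [n] := by unfold gInf; rw [if_neg hm]
        rw [h2, ← ih (uacc ++ [n]), List.take_append_of_le_length (by omega)]

-- the uncapped dedup fold over a nondecreasing list IS sorted(set ·)
theorem foldl_gInf_eq_sorted (ns : List String) (hns : ns.Pairwise (· ≤ ·)) :
    PySem.List.sorted (PySem.Set.ofList ns) (fun x => x) = ns.foldl gInf [] := by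
  have hpw : (ns.foldl gInf []).Pairwise (· < ·) :=
    pairwise_foldl_gInf ns [] hns (by simp) (by simp)
  refine PySem.List.sorted_eq_of_perm_of_pairwise_lt _ _ _ ?_ hpw
  have hnd : (ns.foldl gInf []).Nodup := hpw.imp ne_of_lt
  refine (List.perm_ext_iff_of_nodup hnd (PySem.Set.nodup_ofList _)).2 ?_
  intro a
  rw [mem_foldl_gInf, PySem.Set.mem_ofList]
  simp

-- every value of the comprehension dict {t: [] for t, _ in pairs} is []
theorem getD_initB_aux (l : List (String × String)) (d : PySem.Dict String (List String))
    (h : ∀ t, d.getD t [] = []) (t : String) :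
    (l.foldl (fun d p => d.insert p.1 []) d).getD t [] = [] := by
  induction l generalizing d with
  | nil => exact h t
  | cons p l ih =>
    refine ih _ ?_
    intro t'
    rw [PySem.Dict.getD_insert]
    split_ifs <;> simp [h]

-- the invariant of Source B's single pass: keys are unchanged, and each type's list is the
-- capped-dedup fold of the names of that type seen so far
theorem foldl_stepB (l : List (String × String)) (d : PySem.Dict String (List String))
    (s : PySem.Set (String × String))
    (hkeys : ∀ p ∈ l, p.1 ∈ d.keys)
    (hinv : ∀ p : String × String, p ∈ s ↔ p.2 ∈ d.getD p.1 []) :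
    (l.foldl stepB (d, s)).1.keys = d.keys ∧
    ∀ t, (l.foldl stepB (d, s)).1.getD t []
        = ((l.filter (fun p => p.1 == t)).map (fun p => p.2)).foldl gCap (d.getD t []) := by
  induction l generalizing d s with
  | nil => exact ⟨rfl, fun t => rfl⟩
  | cons p l ih =>
    simp only [List.foldl_cons]
    by_cases hcond : p ∉ s ∧ (d.getD p.1 []).length < 30
    · have hstep : stepB (d, s) p = (d.modify p.1 [] (fun l => l ++ [p.2]), s.add p) := by
        unfold stepB
        rw [if_pos]
        simp only [Bool.and_eq_true, Bool.not_eq_true', decide_eq_true_eq]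
        refine ⟨?_, hcond.2⟩
        rw [← Bool.not_eq_true, PySem.Set.contains_iff]
        exact hcond.1
      rw [hstep]
      have hkd : (d.modify p.1 [] (fun l => l ++ [p.2])).keys = d.keys := by
        rw [PySem.Dict.keys_modify, PySem.Dict.keys_insert_of_contains]
        exact (PySem.Dict.contains_iff_mem_keys _ _).2 (hkeys p List.mem_cons_self)
      have ihres := ih (d.modify p.1 [] (fun l => l ++ [p.2])) (s.add p)
        (by intro q hq; rw [hkd]; exact hkeys q (List.mem_cons_of_mem p hq))
        (by
          intro q
          rw [PySem.Set.mem_add, PySem.Dict.getD_modify]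
          by_cases hq1 : q.1 = p.1
          · rw [if_pos hq1, List.mem_append, List.mem_singleton]
            constructor
            · rintro (hqs | rfl)
              · have hg := (hinv q).1 hqs
                rw [hq1] at hg
                exact Or.inl hg
              · exact Or.inr rfl
            · rintro (hqd | hq2)
              · left
                refine (hinv q).2 ?_
                rw [hq1]
                exact hqd
              · right; exact Prod.ext hq1 hq2
          · rw [if_neg hq1]
            constructor
            · rintro (hqs | rfl)
              · exact (hinv q).1 hqs
              · exact absurd rfl hq1
            · intro hqd; exact Or.inl ((hinv q).2 hqd))
      refine ⟨by rw [ihres.1, hkd], ?_⟩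
      intro t
      rw [ihres.2 t, PySem.Dict.getD_modify]
      by_cases ht : p.1 = t
      · rw [if_pos ht.symm, List.filter_cons_of_pos (by simp [ht]), List.map_cons,
          List.foldl_cons, ← ht]
        have : gCap (d.getD p.1 []) p.2 = d.getD p.1 [] ++ [p.2] := by
          unfold gCap
          rw [if_pos ⟨fun hm => hcond.1 ((hinv p).2 hm), hcond.2⟩]
        rw [this]
      · rw [if_neg (fun h => ht h.symm), List.filter_cons_of_neg (by simp [ht])]
    · have hstep : stepB (d, s) p = (d, s) := by
        unfold stepB
        rw [if_neg]
        simp only [Bool.and_eq_true, Bool.not_eq_true', decide_eq_true_eq, not_and]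
        intro hnc hlen
        refine hcond ⟨fun hps => ?_, hlen⟩
        have hct := (PySem.Set.contains_iff s p).2 hps
        rw [hnc] at hct
        exact Bool.false_ne_true hct
      rw [hstep]
      have ihres := ih d s (fun q hq => hkeys q (List.mem_cons_of_mem p hq)) hinv
      refine ⟨ihres.1, ?_⟩
      intro t
      rw [ihres.2 t]
      by_cases ht : p.1 = t
      · rw [List.filter_cons_of_pos (by simp [ht]), List.map_cons, List.foldl_cons]
        have : gCap (d.getD t []) p.2 = d.getD t [] := by
          unfold gCap
          rw [if_neg]
          rw [← ht]
          rintro ⟨hm, hlen⟩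
          exact hcond ⟨fun hs => hm ((hinv p).1 hs), hlen⟩
        rw [this]
      · rw [List.filter_cons_of_neg (by simp [ht])]

-- A's grouping loop, rewritten over the filtered pair list
theorem groupA_eq (entities : List (List (String × String))) :
    entities.foldl groupStepA PySem.Dict.empty
      = (pairsB entities).foldl (fun d p => d.modify p.1 [] (fun ns => ns ++ [p.2]))
          PySem.Dict.empty := by
  unfold pairsB
  rw [← PySem.List.foldl_ite_eq_foldl_filter (fun p : String × String => p.2 ≠ "")
        (fun d p => PySem.Dict.modify d p.1 [] (fun ns => ns ++ [p.2]))]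
  rw [List.foldl_map]
  rfl

-- per type, B's capped pass over the name-sorted pairs equals A's sorted(set(names))[:30]
theorem perType_eq (pairs : List (String × String)) (t : String) :
    ((((PySem.List.sorted pairs (fun p => p.2)).filter (fun p => p.1 == t)).map
        (fun p => p.2)).foldl gCap [])
      = PySem.List.slice
          (PySem.List.sorted
            (PySem.Set.ofList ((pairs.filter (fun p => p.1 == t)).map (fun p => p.2)))
            (fun x => x)) none (some 30) := by
  have hsl : ∀ (l : List String), PySem.List.slice l none (some 30) = l.take 30 := by
    intro l; simp [pysem]
  rw [hsl]
  set S := PySem.List.sorted pairs (fun p => p.2) with hS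
  set ns := (S.filter (fun p => p.1 == t)).map (fun p => p.2) with hns
  have hpw : ns.Pairwise (· ≤ ·) := by
    rw [hns]
    rw [List.pairwise_map]
    exact (PySem.List.sorted_pairwise pairs (fun p => p.2)).sublist List.filter_sublist
  have h1 : ns.foldl gCap [] = (ns.foldl gInf []).take 30 := by
    have := foldl_gCap_take ns []
    simpa using this
  rw [h1, ← foldl_gInf_eq_sorted ns hpw]
  congr 1
  apply PySem.List.sorted_eq_sorted_of_perm _ _ _ (fun a b h => h)
  refine (List.perm_ext_iff_of_nodup (PySem.Set.nodup_ofList _) (PySem.Set.nodup_ofList _)).2 ?_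
  intro a
  rw [PySem.Set.mem_ofList, PySem.Set.mem_ofList, hns]
  simp only [List.mem_map, List.mem_filter]
  constructor
  · rintro ⟨p, ⟨hpS, hpt⟩, rfl⟩
    exact ⟨p, ⟨(PySem.List.mem_sorted _ _ _ _).1 hpS, hpt⟩, rfl⟩
  · rintro ⟨p, ⟨hpP, hpt⟩, rfl⟩
    exact ⟨p, ⟨(PySem.List.mem_sorted _ _ _ _).2 hpP, hpt⟩, rfl⟩

-- ===== VERDICT (by name: the statement is the Claim_ definition above) =====
theorem summarise_entities_py_spec : Claim_equal_summarise_entities_py := by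
  intro entities _
  unfold Spec_summarise_entities_py summarise_entities_py summarise_entities_py_alt
  rw [groupA_eq]
  set fpairs := pairsB entities with hfp
  set dA := fpairs.foldl (fun d p => d.modify p.1 [] (fun ns => ns ++ [p.2])) PySem.Dict.empty with hdA
  have hkeysA : dA.keys = PySem.Set.ofList (fpairs.map (fun p => p.1)) := by
    rw [hdA, PySem.Dict.keys_foldl_modify_key fpairs (fun p => p.1) []
          (fun _ p => fun ns => ns ++ [p.2])]
    exact PySem.Set.update_nil_left _
  have hkeys0 : (initB fpairs).keys = PySem.Set.ofList (fpairs.map (fun p => p.1)) := by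
    unfold initB
    rw [PySem.Dict.keys_foldl_insert_key fpairs (fun p => p.1) (fun _ _ => [])]
    exact PySem.Set.update_nil_left _
  have hB := foldl_stepB (PySem.List.sorted fpairs (fun p => p.2)) (initB fpairs) PySem.Set.empty
    (by
      intro p hp
      rw [hkeys0, PySem.Set.mem_ofList]
      exact List.mem_map_of_mem ((PySem.List.mem_sorted _ _ _ _).1 hp))
    (by
      intro p
      have h0 : (initB fpairs).getD p.1 [] = [] :=
        getD_initB_aux fpairs PySem.Dict.empty (by simp [PySem.Dict.getD_empty]) p.1
      rw [h0]
      simp [PySem.Set.empty])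
  set dB := ((PySem.List.sorted fpairs (fun p => p.2)).foldl stepB
      (initB fpairs, PySem.Set.empty)).1 with hdB
  have hndA : dA.keys.Nodup := by rw [hkeysA]; exact PySem.Set.nodup_ofList _
  have hndB : dB.keys.Nodup := by rw [hB.1, hkeys0]; exact PySem.Set.nodup_ofList _
  rw [PySem.Dict.items_eq_map_keys dA hndA [], PySem.Dict.items_eq_map_keys dB hndB []]
  rw [List.map_map, hkeysA, hB.1, hkeys0]
  refine List.map_congr_left ?_
  intro t _
  simp only [Function.comp_apply]
  have hgetA : dA.getD t [] = (fpairs.filter (fun p => p.1 == t)).map (fun p => p.2) := by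
    rw [hdA, PySem.Dict.getD_foldl_modify_append]
    simp
  rw [hgetA, hB.2 t]
  have h0 : (initB fpairs).getD t [] = [] :=
    getD_initB_aux fpairs PySem.Dict.empty (by simp [PySem.Dict.getD_empty]) t
  rw [h0, perType_eq]
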